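-- pv_equiv track=rewrite | github.com/sabrinaskaa/ir-dinus-publication | src/search_engine.py | boolean_retrieve
-- ===== SOURCE A (Python) =====
-- def boolean_retrieve(query_tokens, index, op="AND"):
--     sets = [index.get(t, set()) for t in query_tokens]
--     if not sets:
--         return []
--     if op == "AND":
--         result = set.intersection(*sets)
--     else:
--         result = set.union(*sets)
--     return sorted(result)
-- ===== SOURCE B (Python) =====
-- def boolean_retrieve(query_tokens, index, op="AND"):
--     postings = [index.get(t, set()) for t in query_tokens]
--     if not postings:
--         return []
--     counts = {}
--     for s in postings:
--         for d in s:
--             counts[d] = counts.get(d, 0) + 1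
--     if op == "AND":
--         n = len(postings)
--         return sorted(d for d, c in counts.items() if c == n)
--     return sorted(counts)
-- ===== Notes on version B (the rewrite author's own statement) =====
-- stated objective: alternative
-- what changed: Replaces set.intersection/set.union over the posting sets by a single counting pass: one dict maps each document to the number of posting lists containing it, then AND keeps docs with count == number of lists and OR keeps every counted doc.
import Mathlib
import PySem

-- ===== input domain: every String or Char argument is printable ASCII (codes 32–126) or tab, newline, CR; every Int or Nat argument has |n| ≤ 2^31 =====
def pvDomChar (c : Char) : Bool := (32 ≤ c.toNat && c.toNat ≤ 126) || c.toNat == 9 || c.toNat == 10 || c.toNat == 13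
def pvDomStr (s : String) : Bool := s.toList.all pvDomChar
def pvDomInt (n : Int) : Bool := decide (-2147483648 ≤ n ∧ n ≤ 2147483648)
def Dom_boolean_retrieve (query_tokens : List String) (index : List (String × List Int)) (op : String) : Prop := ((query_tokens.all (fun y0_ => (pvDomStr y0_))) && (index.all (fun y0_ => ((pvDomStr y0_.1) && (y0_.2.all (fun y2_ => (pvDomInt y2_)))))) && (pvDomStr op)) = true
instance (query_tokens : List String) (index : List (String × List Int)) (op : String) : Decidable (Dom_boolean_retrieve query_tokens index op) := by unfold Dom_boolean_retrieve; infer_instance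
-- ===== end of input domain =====

-- B replaces set.intersection/set.union over the posting sets by one counting pass
-- (doc -> number of posting lists containing it); same cost, different traversal (objective: alternative).


-- ===== PORT A =====
-- sets = [index.get(t, set()) for t in query_tokens]; intersection/union fold; sorted(result)
def boolean_retrieve (query_tokens : List String) (index : List (String × List Int)) (op : String) : List Int :=
  let sets := query_tokens.map (fun t => (PySem.Dict.mk index).getD t [])
  match sets with
  | [] => []
  | s0 :: rest =>
    let result := if op == "AND" then rest.foldl PySem.Set.inter s0
                  else rest.foldl PySem.Set.union s0
    PySem.List.sorted result (fun x => x) false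

-- ===== PORT B =====
-- counting pass: counts[d] = counts.get(d, 0) + 1 over every posting list, then filter by the count
def boolean_retrieve_alt (query_tokens : List String) (index : List (String × List Int)) (op : String) : List Int :=
  let postings := query_tokens.map (fun t => (PySem.Dict.mk index).getD t [])
  if postings.isEmpty then []
  else
    let counts : PySem.Dict Int Int :=
      postings.foldl (fun d s => s.foldl (fun d x => d.insert x (d.getD x 0 + 1)) d) PySem.Dict.empty
    if op == "AND" then
      PySem.List.sorted ((counts.items.filter (fun p => p.2 == (postings.length : Int))).map Prod.fst) (fun x => x) false
    else
      PySem.List.sorted counts.keys (fun x => x) false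

-- ===== PRECONDITION & SPEC =====
-- Pre_ only states that every posting list is duplicate-free: in Python the index values are
-- set[int], so a list with duplicates does not represent any Python input of this function.
def Pre_boolean_retrieve (query_tokens : List String) (index : List (String × List Int)) (op : String) : Prop :=
  ∀ p ∈ index, p.2.Nodup
instance (query_tokens : List String) (index : List (String × List Int)) (op : String) : Decidable (Pre_boolean_retrieve query_tokens index op) := by unfold Pre_boolean_retrieve; infer_instance
def pvWitness_boolean_retrieve : List String × (List (String × List Int)) × String :=
  (["a", "b"], [("a", [1, 2]), ("b", [2, 3])], "AND")
def Spec_boolean_retrieve (query_tokens : List String) (index : List (String × List Int)) (op : String) (out : List Int) : Prop := out = boolean_retrieve_alt query_tokens index op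
instance (query_tokens : List String) (index : List (String × List Int)) (op : String) (out : List Int) : Decidable (Spec_boolean_retrieve query_tokens index op out) := by unfold Spec_boolean_retrieve; infer_instance

-- ===== CLAIM (what is proved, stated in full; the proofs are below) =====
def Claim_equal_boolean_retrieve : Prop := ∀ (query_tokens : List String) (index : List (String × List Int)) (op : String), Dom_boolean_retrieve query_tokens index op → Pre_boolean_retrieve query_tokens index op → Spec_boolean_retrieve query_tokens index op (boolean_retrieve query_tokens index op)

-- ===== LEMMAS AND PROOFS =====

-- a looked-up posting list is either the default [] or one of the index's values
theorem lookup_nodup (index : List (String × List Int))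
    (h : ∀ p ∈ index, p.2.Nodup) (t : String) :
    ((PySem.Dict.mk index).getD t []).Nodup := by
  induction index with
  | nil => simp [PySem.Dict.getD, PySem.Dict.get?]
  | cons p rest ih =>
    have hrest : ∀ q ∈ rest, q.2.Nodup := fun q hq => h q (List.mem_cons_of_mem _ hq)
    simp only [PySem.Dict.getD] at *
    rw [PySem.Dict.get?_mk_cons]
    split
    · simpa using h p (List.mem_cons_self)
    · exact ih hrest

-- membership in the intersection fold
theorem mem_foldl_inter (rest : List (PySem.Set Int)) (s0 : PySem.Set Int) (x : Int) :
    x ∈ rest.foldl PySem.Set.inter s0 ↔ x ∈ s0 ∧ ∀ s ∈ rest, x ∈ s := by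
  induction rest generalizing s0 with
  | nil => simp
  | cons s rest ih =>
    simp [List.foldl_cons, ih, PySem.Set.mem_inter]
    tauto

theorem nodup_foldl_inter (rest : List (PySem.Set Int)) (s0 : PySem.Set Int)
    (h : s0.Nodup) : (rest.foldl PySem.Set.inter s0).Nodup := by
  induction rest generalizing s0 with
  | nil => exact h
  | cons s rest ih => exact ih _ (PySem.Set.nodup_inter _ _ h)

-- membership in the union fold
theorem mem_foldl_union (rest : List (PySem.Set Int)) (s0 : PySem.Set Int) (x : Int) :
    x ∈ rest.foldl PySem.Set.union s0 ↔ x ∈ s0 ∨ ∃ s ∈ rest, x ∈ s := by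
  induction rest generalizing s0 with
  | nil => simp
  | cons s rest ih =>
    simp [List.foldl_cons, ih, PySem.Set.mem_union]
    tauto

theorem nodup_foldl_union (rest : List (PySem.Set Int)) (s0 : PySem.Set Int)
    (h : s0.Nodup) : (rest.foldl PySem.Set.union s0).Nodup := by
  induction rest generalizing s0 with
  | nil => exact h
  | cons s rest ih => exact ih _ (PySem.Set.nodup_union _ _ h)

-- each duplicate-free list contributes at most one occurrence
theorem count_flatten_le (sets : List (List Int)) (x : Int)
    (h : ∀ s ∈ sets, s.Nodup) :
    sets.flatten.count x ≤ sets.length := by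
  induction sets with
  | nil => simp
  | cons s rest ih =>
    have hs : s.count x ≤ 1 := List.nodup_iff_count_le_one.mp (h s List.mem_cons_self) x
    have hr := ih (fun q hq => h q (List.mem_cons_of_mem _ hq))
    simp only [List.flatten_cons, List.count_append, List.length_cons]
    omega

-- full count iff the element is in every (duplicate-free) list
theorem count_flatten_eq_length (sets : List (List Int)) (x : Int)
    (h : ∀ s ∈ sets, s.Nodup) :
    sets.flatten.count x = sets.length ↔ ∀ s ∈ sets, x ∈ s := by
  induction sets with
  | nil => simp
  | cons s rest ih =>
    have hs : s.Nodup := h s List.mem_cons_self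
    have hrestnd : ∀ q ∈ rest, q.Nodup := fun q hq => h q (List.mem_cons_of_mem _ hq)
    have hrest := ih hrestnd
    have hle := count_flatten_le rest x hrestnd
    have hcs : s.count x ≤ 1 := List.nodup_iff_count_le_one.mp hs x
    simp only [List.flatten_cons, List.count_append, List.length_cons, List.mem_cons]
    constructor
    · intro he
      have hs1 : s.count x = 1 := by omega
      have hr : rest.flatten.count x = rest.length := by omega
      refine fun q hq => ?_
      rcases hq with rfl | hq'
      · exact List.count_pos_iff.mp (by omega)
      · exact (hrest.mp hr) q hq'
    · intro hall
      have h1 : s.count x = 1 := List.count_eq_one_of_mem hs (hall s (Or.inl rfl))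
      have h2 : rest.flatten.count x = rest.length := hrest.mpr (fun q hq => hall q (Or.inr hq))
      omega

-- the B-side AND list is a filter of the deduped flattened postings
theorem bAnd_eq (flat : List Int) (n : Int) :
    (((PySem.Dict.counter flat).items.filter (fun p => p.2 == n)).map Prod.fst)
      = (PySem.Set.ofList flat).filter (fun k => ((flat.count k : Int) == n)) := by
  rw [PySem.Dict.items_counter, List.filter_map, List.map_map]
  simp [Function.comp_def]

theorem ports_agree (query_tokens : List String) (index : List (String × List Int)) (op : String)
    (hpre : ∀ p ∈ index, p.2.Nodup) :
    boolean_retrieve query_tokens index op = boolean_retrieve_alt query_tokens index op := by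
  unfold boolean_retrieve boolean_retrieve_alt
  simp only []
  cases hc : query_tokens.map (fun t => (PySem.Dict.mk index).getD t []) with
  | nil => simp
  | cons s0 rest =>
    have hnodup : ∀ s ∈ s0 :: rest, s.Nodup := by
      rw [← hc]
      intro s hs
      rcases List.mem_map.mp hs with ⟨t, _, rfl⟩
      exact lookup_nodup index hpre t
    simp only [List.isEmpty_cons, Bool.false_eq_true, if_false]
    have hcounts : (s0 :: rest).foldl (fun d s => s.foldl (fun d x => d.insert x (d.getD x 0 + 1)) d) PySem.Dict.empty
        = PySem.Dict.counter ((s0 :: rest).flatten) := by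
      rw [← PySem.Dict.foldl_insert_getD_add_one_eq_counter, List.foldl_flatten]
    rw [hcounts]
    by_cases hop : op == "AND"
    · simp only [hop, if_true]
      rw [bAnd_eq]
      apply PySem.List.sorted_eq_sorted_of_perm _ _ _ (fun a b h => h)
      rw [List.perm_ext_iff_of_nodup (nodup_foldl_inter _ _ (hnodup s0 List.mem_cons_self))
        (List.Nodup.filter _ (PySem.Set.nodup_ofList _))]
      intro x
      rw [mem_foldl_inter, List.mem_filter, PySem.Set.mem_ofList]
      have hcnt := count_flatten_eq_length (s0 :: rest) x hnodup
      constructor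
      · rintro ⟨h0, hr⟩
        have hall : ∀ s ∈ s0 :: rest, x ∈ s := by
          intro s hs; rcases List.mem_cons.mp hs with rfl | hs'
          · exact h0
          · exact hr s hs'
        refine ⟨List.mem_flatten.mpr ⟨s0, List.mem_cons_self, h0⟩, ?_⟩
        have hq := hcnt.mpr hall
        simp only [List.flatten_cons, List.count_append, List.length_cons] at hq ⊢
        simp only [beq_iff_eq]
        push_cast
        omega
      · rintro ⟨_, hcq⟩
        have hq : (s0 :: rest).flatten.count x = (s0 :: rest).length := by
          have := of_decide_eq_true hcq
          exact_mod_cast this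
        have hall := hcnt.mp hq
        exact ⟨hall s0 List.mem_cons_self, fun s hs => hall s (List.mem_cons_of_mem _ hs)⟩
    · simp only [hop, Bool.false_eq_true, if_false]
      rw [PySem.Dict.keys_counter]
      apply PySem.List.sorted_eq_sorted_of_perm _ _ _ (fun a b h => h)
      rw [List.perm_ext_iff_of_nodup (nodup_foldl_union _ _ (hnodup s0 List.mem_cons_self))
        (PySem.Set.nodup_ofList _)]
      intro x
      rw [mem_foldl_union, PySem.Set.mem_ofList, List.mem_flatten]
      constructor
      · rintro (h0 | ⟨s, hs, hx⟩)
        · exact ⟨s0, List.mem_cons_self, h0⟩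
        · exact ⟨s, List.mem_cons_of_mem _ hs, hx⟩
      · rintro ⟨s, hs, hx⟩
        rcases List.mem_cons.mp hs with rfl | hs'
        · exact Or.inl hx
        · exact Or.inr ⟨s, hs', hx⟩

-- ===== VERDICT (by name: the statement is the Claim_ definition above) =====
theorem boolean_retrieve_spec : Claim_equal_boolean_retrieve := by
  intro query_tokens index op _ hpre
  exact ports_agree query_tokens index op hpre
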